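-- pv_equiv track=rewrite | github.com/p-lots/codewars | 7-kyu/move-all-vowels/python/solution.py | move_vowels
-- ===== SOURCE A (Python) =====
-- def move_vowels(strng):
--     vowels = ''
--     cons = ''
--     for ch in strng:
--         if ch in 'aeiou':
--             vowels += ch
--         else:
--             cons += ch
--     return cons + vowels
-- ===== SOURCE B (Python) =====
-- def move_vowels(strng):
--     # Stable sort with a boolean key: consonants (False) keep order and come
--     # first, vowels (True) keep order and follow.
--     return ''.join(sorted(strng, key=lambda ch: ch in 'aeiou'))
-- ===== Notes on version B (the rewrite author's own statement) =====
-- stated objective: idiomatic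
-- what changed: Replaces the two-accumulator partition loop with a single stable sort on a boolean vowel-membership key plus join; stability keeps consonants before vowels in original order.
import Mathlib
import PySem

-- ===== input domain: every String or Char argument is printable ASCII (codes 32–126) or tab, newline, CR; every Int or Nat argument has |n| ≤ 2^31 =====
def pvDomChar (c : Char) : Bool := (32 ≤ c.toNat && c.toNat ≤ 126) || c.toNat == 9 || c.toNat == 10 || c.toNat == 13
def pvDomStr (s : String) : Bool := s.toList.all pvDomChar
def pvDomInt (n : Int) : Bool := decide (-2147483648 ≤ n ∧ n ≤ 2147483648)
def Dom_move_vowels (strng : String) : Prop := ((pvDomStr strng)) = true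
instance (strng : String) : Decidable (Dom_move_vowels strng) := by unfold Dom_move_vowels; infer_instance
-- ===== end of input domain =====

-- B replaces A's two-accumulator partition loop with one stable sort on a boolean
-- "is vowel" key (objective: idiomatic; same return value).


def pvVowels : List Char := ['a', 'e', 'i', 'o', 'u']

-- ===== PORT A =====
-- A: one pass, two accumulators (vowels, cons); return cons ++ vowels.
def move_vowels (strng : String) : String :=
  let p := strng.toList.foldl
    (fun (acc : List Char × List Char) ch =>
      if ch ∈ pvVowels then (acc.1 ++ [ch], acc.2) else (acc.1, acc.2 ++ [ch]))
    ([], [])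
  String.mk (p.2 ++ p.1)

-- ===== PORT B =====
-- B: stable sort by the boolean key "ch in 'aeiou'", then join.
def move_vowels_alt (strng : String) : String :=
  String.mk (PySem.List.sorted strng.toList (fun ch => decide (ch ∈ pvVowels)) false)

-- ===== PRECONDITION & SPEC =====
def Spec_move_vowels (strng : String) (out : String) : Prop := out = move_vowels_alt strng
instance (strng : String) (out : String) : Decidable (Spec_move_vowels strng out) := by unfold Spec_move_vowels; infer_instance

-- ===== CLAIM (what is proved, stated in full; the proofs are below) =====
def Claim_equal_move_vowels : Prop := ∀ (strng : String), Dom_move_vowels strng → Spec_move_vowels strng (move_vowels strng)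

-- ===== LEMMAS AND PROOFS =====

-- Inserting x into cs ++ vs (cs all key-false, vs all key-true) by the stable
-- insertion rule lands x at the end of its own class.
theorem insertBy_bool_partition (key : Char → Bool) (x : Char) (cs vs : List Char)
    (hc : ∀ a ∈ cs, key a = false) (hv : ∀ a ∈ vs, key a = true) :
    PySem.List.insertBy (fun a b => decide (key a < key b)) x (cs ++ vs) =
      if key x then cs ++ vs ++ [x] else cs ++ x :: vs := by
  have dlt_false : ∀ b : Bool, decide (b < false) = false := by decide
  induction cs with
  | nil =>
    simp only [List.nil_append]
    induction vs with
    | nil =>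
      cases h : key x <;> simp [PySem.List.insertBy]
    | cons y ys ih =>
      have hy : key y = true := hv y (by simp)
      have ih' := ih (fun a ha => hv a (by simp [ha]))
      cases h : key x with
      | false =>
        simp [PySem.List.insertBy, h, hy]
      | true =>
        rw [if_pos h] at ih'
        simp [PySem.List.insertBy, h, hy, ih']
  | cons c cs' ih =>
    have hc0 : key c = false := hc c (by simp)
    have ih' := ih (fun a ha => hc a (by simp [ha]))
    cases h : key x with
    | false =>
      rw [if_neg (by simp [h])] at ih'
      simp [PySem.List.insertBy, hc0, h, ih']
    | true =>
      rw [if_pos h] at ih'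
      simp [PySem.List.insertBy, hc0, h, ih']

-- The stable-sort fold over a boolean key, started from a partitioned state,
-- ends in the partitioned state extended by each class's filter.
theorem foldl_insertBy_partition (key : Char → Bool) (xs cs vs : List Char)
    (hc : ∀ a ∈ cs, key a = false) (hv : ∀ a ∈ vs, key a = true) :
    List.foldl (fun acc x => PySem.List.insertBy (fun a b => decide (key a < key b)) x acc)
        (cs ++ vs) xs =
      (cs ++ xs.filter (fun c => !key c)) ++ (vs ++ xs.filter key) := by
  induction xs generalizing cs vs with
  | nil => simp
  | cons x xs' ih =>
    simp only [List.foldl_cons]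
    rw [insertBy_bool_partition key x cs vs hc hv]
    cases h : key x with
    | false =>
      rw [if_neg (by simp)]
      have h2 := ih (cs ++ [x]) vs
        (by intro a ha; rcases List.mem_append.mp ha with h1 | h1
            · exact hc a h1
            · simp at h1; subst h1; exact h) hv
      rw [show cs ++ x :: vs = (cs ++ [x]) ++ vs by simp, h2]
      simp [h]
    | true =>
      rw [if_pos rfl]
      have h2 := ih cs (vs ++ [x]) hc
        (by intro a ha; rcases List.mem_append.mp ha with h1 | h1
            · exact hv a h1
            · simp at h1; subst h1; exact h)
      rw [show cs ++ vs ++ [x] = cs ++ (vs ++ [x]) by simp, h2]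
      simp [h]

theorem sorted_bool_key (key : Char → Bool) (xs : List Char) :
    PySem.List.sorted xs key false = xs.filter (fun c => !key c) ++ xs.filter key := by
  have := foldl_insertBy_partition key xs [] [] (by simp) (by simp)
  simpa [PySem.List.sorted] using this

-- A's fold accumulates exactly the two filters.
theorem foldA_filter (xs : List Char) (v0 c0 : List Char) :
    List.foldl
      (fun (acc : List Char × List Char) ch =>
        if ch ∈ pvVowels then (acc.1 ++ [ch], acc.2) else (acc.1, acc.2 ++ [ch]))
      (v0, c0) xs =
      (v0 ++ xs.filter (fun c => decide (c ∈ pvVowels)),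
       c0 ++ xs.filter (fun c => !decide (c ∈ pvVowels))) := by
  induction xs generalizing v0 c0 with
  | nil => simp
  | cons x xs' ih =>
    by_cases h : x ∈ pvVowels <;>
      simp [List.foldl_cons, h, ih]

-- ===== VERDICT (by name: the statement is the Claim_ definition above) =====
theorem move_vowels_spec : Claim_equal_move_vowels := by
  intro strng _
  unfold Spec_move_vowels
  simp [move_vowels, move_vowels_alt, sorted_bool_key, foldA_filter]
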